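-- pv_equiv track=rewrite | github.com/NiteshShivam/Programming | array/Maximum number of zeroes.py | maxZero
-- ===== SOURCE A (Python) =====
-- def maxZero(arr):
--     zero = 0
--     ans =""
--     n = len(arr)
--     for i in range(n):
--         curr = arr[i]
--         count = curr.count('0')
--         if count>0 and count>zero:
--             zero=count
--             ans=curr
--         elif count>0 and count==zero:
--             if len(curr)>len(ans):
--                 ans=curr
--             elif len(curr)==len(ans):
--                 if curr>ans:
--                     ans=curr
--     if ans=="":
--         return '-1'
--     return ans
-- ===== SOURCE B (Python) =====
-- def maxZero(arr):
--     best = max((s.count('0') for s in arr), default=0)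
--     if best == 0:
--         return '-1'
--     cands = [s for s in arr if s.count('0') == best]
--     return max(cands, key=lambda s: (len(s), s))
-- ===== Notes on version B (the rewrite author's own statement) =====
-- stated objective: simpler
-- what changed: Replaces A's single scan carrying a (best-count, best-string) accumulator with an explicit if/elif tie-break cascade by two separate passes: first compute the maximum zero-count, then take the max of the tied strings under the key (len, s); the 0-count/empty case falls out of best == 0.
import Mathlib
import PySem

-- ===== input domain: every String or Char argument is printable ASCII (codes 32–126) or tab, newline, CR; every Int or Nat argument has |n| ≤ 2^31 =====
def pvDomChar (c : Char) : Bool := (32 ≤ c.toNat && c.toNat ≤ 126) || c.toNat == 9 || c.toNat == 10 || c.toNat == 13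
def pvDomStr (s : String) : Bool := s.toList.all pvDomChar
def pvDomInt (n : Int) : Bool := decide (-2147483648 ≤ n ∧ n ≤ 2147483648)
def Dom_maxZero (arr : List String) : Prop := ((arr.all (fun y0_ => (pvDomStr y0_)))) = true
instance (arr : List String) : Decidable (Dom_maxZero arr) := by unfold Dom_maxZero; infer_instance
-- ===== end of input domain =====

-- B replaces A's single accumulator scan by two passes (max zero-count, then max-by-(len,lex)
-- among the tied strings); objective: simpler, same asymptotic cost.

-- ===== PORT A =====
-- the body of A's for-loop, acting on the state (zero, ans)
def maxZeroStep (st : Nat × String) (curr : String) : Nat × String :=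
  let count := PySem.Str.count curr "0"
  if count > 0 ∧ count > st.1 then (count, curr)
  else if count > 0 ∧ count = st.1 then
    if PySem.Str.len curr > PySem.Str.len st.2 then (st.1, curr)
    else if PySem.Str.len curr = PySem.Str.len st.2 then
      if st.2 < curr then (st.1, curr) else st
    else st
  else st

def maxZero (arr : List String) : String :=
  let st := arr.foldl maxZeroStep (0, "")
  if st.2 = "" then "-1" else st.2

-- ===== PORT B =====
def maxZero_alt (arr : List String) : String :=
  let best := (PySem.List.max? (arr.map (fun s => PySem.Str.count s "0")) (fun x => x)).getD 0
  if best = 0 then "-1"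
  else
    -- Python's max(cands, key=lambda s: (len(s), s)); cands is provably nonempty here,
    -- so the `getD ""` only totalizes the expression
    (PySem.List.max2? (arr.filter (fun s => PySem.Str.count s "0" == best))
      PySem.Str.len (fun s => s)).getD ""

-- ===== PRECONDITION & SPEC =====
def Spec_maxZero (arr : List String) (out : String) : Prop := out = maxZero_alt arr
instance (arr : List String) (out : String) : Decidable (Spec_maxZero arr out) := by unfold Spec_maxZero; infer_instance

-- ===== CLAIM (what is proved, stated in full; the proofs are below) =====
def Claim_equal_maxZero : Prop := ∀ (arr : List String), Dom_maxZero arr → Spec_maxZero arr (maxZero arr)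

-- ===== LEMMAS AND PROOFS =====

-- zero-count of a string, and the running maximum of zero-counts of a list
def zc (s : String) : Nat := PySem.Str.count s "0"

def maxc (l : List String) : Nat := (l.map zc).foldl max 0

-- the tie-break order used by both programs: shorter-or-lexicographically-smaller
def keyLe (s a : String) : Prop :=
  PySem.Str.len s < PySem.Str.len a ∨ (PySem.Str.len s = PySem.Str.len a ∧ s ≤ a)

theorem keyLe_refl (s : String) : keyLe s s := Or.inr ⟨rfl, le_refl s⟩

theorem keyLe_trans {a b c : String} (h1 : keyLe a b) (h2 : keyLe b c) : keyLe a c := by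
  rcases h1 with h1 | ⟨h1, h1'⟩ <;> rcases h2 with h2 | ⟨h2, h2'⟩
  · exact Or.inl (lt_trans h1 h2)
  · exact Or.inl (h2 ▸ h1)
  · exact Or.inl (h1 ▸ h2)
  · exact Or.inr ⟨h1.trans h2, le_trans h1' h2'⟩

theorem keyLe_antisymm {a b : String} (h1 : keyLe a b) (h2 : keyLe b a) : a = b := by
  rcases h1 with h1 | ⟨h1, h1'⟩ <;> rcases h2 with h2 | ⟨h2, h2'⟩
  · exact absurd h2 (not_lt.mpr (le_of_lt h1))
  · exact absurd h1 (not_lt.mpr (le_of_eq h2))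
  · exact absurd h2 (not_lt.mpr (le_of_eq h1))
  · exact le_antisymm h1' h2'

-- every element's zero-count is at most maxc
theorem zc_le_maxc {l : List String} {s : String} (h : s ∈ l) : zc s ≤ maxc l := by
  have := (PySem.List.le_foldl_max (l.map zc) 0).2
  exact this (zc s) (List.mem_map_of_mem h)

theorem maxc_append (l : List String) (s : String) :
    maxc (l ++ [s]) = max (maxc l) (zc s) := by
  simp [maxc, List.foldl_append]

-- the fold step of PySem.List.max2? with keys (len, id), as a standalone function
def step2 (acc : Option String) (x : String) : Option String :=
  match acc with
  | none => some x
  | some mm =>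
    if (decide (PySem.Str.len mm < PySem.Str.len x) ||
        !decide (PySem.Str.len x < PySem.Str.len mm) && decide (mm < x)) = true
    then some x else some mm

theorem max2_eq (xs : List String) :
    PySem.List.max2? xs PySem.Str.len (fun s => s) = xs.foldl step2 none := by
  unfold PySem.List.max2?
  congr 1
  funext acc x
  cases acc <;> rfl

theorem step2_cases (m x : String) :
    (step2 (some m) x = some x ∧ keyLe m x) ∨ (step2 (some m) x = some m ∧ keyLe x m) := by
  by_cases hc : (decide (PySem.Str.len m < PySem.Str.len x) ||
      !decide (PySem.Str.len x < PySem.Str.len m) && decide (m < x)) = true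
  · left
    refine ⟨by simp only [step2]; rw [if_pos hc], ?_⟩
    by_cases hl : PySem.Str.len m < PySem.Str.len x
    · exact Or.inl hl
    · simp only [Bool.or_eq_true, Bool.and_eq_true, Bool.not_eq_true', decide_eq_true_eq,
        decide_eq_false_iff_not] at hc
      rcases hc with h | ⟨h1, h2⟩
      · exact absurd h hl
      · exact Or.inr ⟨le_antisymm (not_lt.mp h1) (not_lt.mp hl), le_of_lt h2⟩
  · right
    refine ⟨by simp only [step2]; rw [if_neg hc], ?_⟩
    simp only [Bool.or_eq_true, Bool.and_eq_true, Bool.not_eq_true', decide_eq_true_eq,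
      decide_eq_false_iff_not] at hc
    push_neg at hc
    obtain ⟨h1, h2⟩ := hc
    by_cases hl : PySem.Str.len x < PySem.Str.len m
    · exact Or.inl hl
    · exact Or.inr ⟨le_antisymm h1 (not_lt.mp hl), h2 (not_lt.mp hl)⟩

-- characterisation of the max2? fold (first extremal element under (len, lex))
theorem max2_go (xs : List String) : ∀ (m : String),
    ∃ r, xs.foldl step2 (some m) = some r ∧ (r = m ∨ r ∈ xs) ∧ keyLe m r ∧ ∀ y ∈ xs, keyLe y r := by
  induction xs with
  | nil => exact fun m => ⟨m, rfl, Or.inl rfl, keyLe_refl m, by simp⟩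
  | cons x xs ih =>
    intro m
    rcases step2_cases m x with ⟨heq, hkey⟩ | ⟨heq, hkey⟩
    · obtain ⟨r, hr, hmem, hk, hall⟩ := ih x
      refine ⟨r, by rw [List.foldl_cons, heq]; exact hr, ?_, keyLe_trans hkey hk, ?_⟩
      · rcases hmem with h | h
        · exact Or.inr (h ▸ List.mem_cons_self)
        · exact Or.inr (List.mem_cons_of_mem _ h)
      · intro y hy
        rcases List.mem_cons.mp hy with h | h
        · exact h ▸ hk
        · exact hall y h
    · obtain ⟨r, hr, hmem, hk, hall⟩ := ih m
      refine ⟨r, by rw [List.foldl_cons, heq]; exact hr, ?_, hk, ?_⟩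
      · rcases hmem with h | h
        · exact Or.inl h
        · exact Or.inr (List.mem_cons_of_mem _ h)
      · intro y hy
        rcases List.mem_cons.mp hy with h | h
        · exact h ▸ keyLe_trans hkey hk
        · exact hall y h

-- A's loop invariant: the state after the fold
theorem foldA (l : List String) :
    (l.foldl maxZeroStep (0, "")).1 = maxc l
    ∧ (maxc l = 0 → (l.foldl maxZeroStep (0, "")).2 = "")
    ∧ (maxc l ≠ 0 → (l.foldl maxZeroStep (0, "")).2 ∈ l
        ∧ zc (l.foldl maxZeroStep (0, "")).2 = maxc l
        ∧ ∀ s ∈ l, zc s = maxc l → keyLe s (l.foldl maxZeroStep (0, "")).2) := by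
  induction l using List.reverseRecOn with
  | nil => exact ⟨rfl, fun _ => rfl, fun h => absurd rfl h⟩
  | append_singleton l s ih =>
    obtain ⟨hz, h0, hpos⟩ := ih
    rw [List.foldl_append, List.foldl_cons, List.foldl_nil, maxc_append]
    set st := l.foldl maxZeroStep (0, "") with hst
    by_cases hb1 : PySem.Str.count s "0" > 0 ∧ PySem.Str.count s "0" > st.1
    · -- new strict maximum: state becomes (count, s)
      have hstep : maxZeroStep st s = (PySem.Str.count s "0", s) := by
        simp only [maxZeroStep]; rw [if_pos hb1]
      rw [hstep]
      have hmax : max (maxc l) (zc s) = zc s := by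
        have := hb1.2; rw [hz] at this; exact Nat.max_eq_right (le_of_lt this)
      refine ⟨by rw [hmax]; rfl, by intro h; rw [hmax] at h; have h2 : zc s > 0 := hb1.1; omega, ?_⟩
      intro _
      refine ⟨List.mem_append_right _ List.mem_cons_self, by rw [hmax], ?_⟩
      intro t ht htc
      rcases List.mem_append.mp ht with h | h
      · exfalso
        have h1 := zc_le_maxc h
        rw [hmax] at htc
        have h2 := hb1.2; rw [hz] at h2
        have h3 : zc s = PySem.Str.count s "0" := rfl
        omega
      · rw [List.mem_singleton.mp h]; exact keyLe_refl s
    · by_cases hb2 : PySem.Str.count s "0" > 0 ∧ PySem.Str.count s "0" = st.1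
      · -- tied count: tie-break on (len, lex)
        have hzpos : maxc l ≠ 0 := by rw [← hz]; omega
        obtain ⟨hmem, hzc, hall⟩ := hpos hzpos
        have hzs : zc s = maxc l := hb2.2.trans hz
        have hmax : max (maxc l) (zc s) = maxc l := by rw [hzs, Nat.max_self]
        have hgoal : ∀ r, (r = s ∧ keyLe st.2 r ∨ r = st.2 ∧ keyLe s r) → maxZeroStep st s = (st.1, r) →
            ((st.1, r).1 = max (maxc l) (zc s)
            ∧ (max (maxc l) (zc s) = 0 → ((st.1, r) : Nat × String).2 = "")
            ∧ (max (maxc l) (zc s) ≠ 0 → ((st.1, r) : Nat × String).2 ∈ l ++ [s]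
                ∧ zc ((st.1, r) : Nat × String).2 = max (maxc l) (zc s)
                ∧ ∀ t ∈ l ++ [s], zc t = max (maxc l) (zc s) → keyLe t ((st.1, r) : Nat × String).2)) := by
          intro r hrcase hstep
          rw [hmax]
          refine ⟨by rw [hz], fun h => absurd h hzpos, fun _ => ?_⟩
          rcases hrcase with ⟨hr, hkr⟩ | ⟨hr, hkr⟩
          · subst hr
            refine ⟨List.mem_append_right _ List.mem_cons_self, hzs, ?_⟩
            intro t ht htc
            rcases List.mem_append.mp ht with h | h
            · exact keyLe_trans (hall t h htc) hkr
            · rw [List.mem_singleton.mp h]; exact keyLe_refl _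
          · subst hr
            refine ⟨List.mem_append_left _ hmem, hzc, ?_⟩
            intro t ht htc
            rcases List.mem_append.mp ht with h | h
            · exact hall t h htc
            · rw [List.mem_singleton.mp h]; exact hkr
        by_cases hb3 : PySem.Str.len s > PySem.Str.len st.2
        · have hstep : maxZeroStep st s = (st.1, s) := by
            simp only [maxZeroStep]; rw [if_neg hb1, if_pos hb2, if_pos hb3]
          rw [hstep]; exact hgoal s (Or.inl ⟨rfl, Or.inl hb3⟩) hstep
        · by_cases hb4 : PySem.Str.len s = PySem.Str.len st.2
          · by_cases hb5 : st.2 < s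
            · have hstep : maxZeroStep st s = (st.1, s) := by
                simp only [maxZeroStep]; rw [if_neg hb1, if_pos hb2, if_neg hb3, if_pos hb4, if_pos hb5]
              rw [hstep]; exact hgoal s (Or.inl ⟨rfl, Or.inr ⟨hb4.symm, le_of_lt hb5⟩⟩) hstep
            · have hstep : maxZeroStep st s = (st.1, st.2) := by
                simp only [maxZeroStep]; rw [if_neg hb1, if_pos hb2, if_neg hb3, if_pos hb4, if_neg hb5]
              rw [hstep]; exact hgoal st.2 (Or.inr ⟨rfl, Or.inr ⟨hb4, not_lt.mp hb5⟩⟩) hstep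
          · have hstep : maxZeroStep st s = (st.1, st.2) := by
              simp only [maxZeroStep]; rw [if_neg hb1, if_pos hb2, if_neg hb3, if_neg hb4]
            rw [hstep]
            exact hgoal st.2 (Or.inr ⟨rfl, Or.inl (lt_of_le_of_ne (not_lt.mp hb3) hb4)⟩) hstep
      · -- count 0 or below the running maximum: state unchanged
        have hstep : maxZeroStep st s = st := by
          simp only [maxZeroStep]; rw [if_neg hb1, if_neg hb2]
        rw [hstep]
        have hle : zc s ≤ maxc l := by
          rw [← hz]; simp only [zc]; omega
        have hmax : max (maxc l) (zc s) = maxc l := Nat.max_eq_left hle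
        rw [hmax]
        refine ⟨hz, h0, fun h => ?_⟩
        obtain ⟨hmem, hzc, hall⟩ := hpos h
        refine ⟨List.mem_append_left _ hmem, hzc, ?_⟩
        intro t ht htc
        rcases List.mem_append.mp ht with hh | hh
        · exact hall t hh htc
        · exfalso
          rw [List.mem_singleton.mp hh] at htc
          rw [← hz] at htc hle
          simp only [zc] at htc hle ⊢
          omega
-- B's first pass computes exactly maxc
theorem best_eq (arr : List String) :
    (PySem.List.max? (arr.map (fun s => PySem.Str.count s "0")) (fun x => x)).getD 0 = maxc arr := by
  have h : arr.map (fun s => PySem.Str.count s "0") = arr.map zc := rfl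
  rw [h]
  cases arr with
  | nil => rfl
  | cons x t =>
    rw [List.map_cons, PySem.List.max?_id_cons, Option.getD_some]
    simp [maxc]

theorem zc_empty : zc "" = 0 := by decide

-- ===== VERDICT (by name: the statement is the Claim_ definition above) =====
theorem maxZero_spec : Claim_equal_maxZero := by
  unfold Claim_equal_maxZero Spec_maxZero
  intro arr _
  obtain ⟨hz, h0, hpos⟩ := foldA arr
  by_cases hm : maxc arr = 0
  · -- no string contains a zero: both return "-1"
    have ha := h0 hm
    simp only [maxZero, maxZero_alt]
    rw [ha, if_pos rfl, best_eq, if_pos hm]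
  · obtain ⟨hmem, hzc, hall⟩ := hpos hm
    set a := (arr.foldl maxZeroStep (0, "")).2 with hadef
    have hane : a ≠ "" := by
      intro h
      rw [h, zc_empty] at hzc
      exact hm hzc.symm
    have hA : maxZero arr = a := by
      simp only [maxZero]
      rw [if_neg hane]
    rw [hA]
    simp only [maxZero_alt, best_eq]
    rw [if_neg hm]
    set cands := arr.filter (fun s => PySem.Str.count s "0" == maxc arr) with hcands
    have hacand : a ∈ cands := by
      rw [hcands]
      exact List.mem_filter.mpr ⟨hmem, by simp only [beq_iff_eq]; exact hzc⟩
    have hcand_prop : ∀ y ∈ cands, y ∈ arr ∧ zc y = maxc arr := by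
      intro y hy
      rw [hcands] at hy
      obtain ⟨h1, h2⟩ := List.mem_filter.mp hy
      exact ⟨h1, beq_iff_eq.mp h2⟩
    cases hc : cands with
    | nil => exact absurd (hc ▸ hacand) (List.not_mem_nil)
    | cons h t =>
      rw [max2_eq, List.foldl_cons]
      have hstep0 : step2 none h = some h := rfl
      rw [hstep0]
      obtain ⟨r, hr, hmemr, hk, hallr⟩ := max2_go t h
      rw [hr, Option.getD_some]
      have hrc : r ∈ cands := by
        rw [hc]
        rcases hmemr with hh | hh
        · exact hh ▸ List.mem_cons_self
        · exact List.mem_cons_of_mem _ hh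
      have h1 : keyLe r a := by
        obtain ⟨hra, hrz⟩ := hcand_prop r hrc
        exact hall r hra hrz
      have h2 : keyLe a r := by
        have : a ∈ h :: t := hc ▸ hacand
        rcases List.mem_cons.mp this with hh | hh
        · exact hh ▸ hk
        · exact hallr a hh
      exact (keyLe_antisymm h1 h2).symm
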